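-- pv_equiv track=rewrite | github.com/alskaf1293/neuralcomputer | python_rtl/pendulum_active_inference.py | layer_dims
-- ===== SOURCE A (Python) =====
-- from typing import Sequence, List
--
-- def layer_dims(k_lut: Sequence[int], m0: int = 0) -> list[tuple[int, int, int]]:
--     """Return (k, n, m) for each layer index."""
--     nl = len(k_lut)
--     out = []
--     for ul in range(nl):
--         k = k_lut[ul]
--         n = k_lut[0] if nl == 1 else (k_lut[nl-2] if ul == nl-1 else k_lut[ul+1])
--         m = m0 if ul == 0 else k_lut[ul-1]
--         out.append((k, n, m))
--     return out
-- ===== SOURCE B (Python) =====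
-- def layer_dims(k_lut, m0=0):
--     """Return (k, n, m) for each layer index."""
--     nl = len(k_lut)
--     if nl == 0:
--         return []
--     k_list = list(k_lut)
--     m_list = [m0] + list(k_lut[:-1])
--     n_list = [k_lut[0]] if nl == 1 else list(k_lut[1:]) + [k_lut[nl - 2]]
--     return list(zip(k_list, n_list, m_list))
-- ===== Notes on version B (the rewrite author's own statement) =====
-- stated objective: simpler
-- what changed: Replaces the per-index loop with three if/else lookups by building three shifted parallel lists (k_lut itself, k_lut shifted left with the corner fixed, m0 followed by k_lut shifted right) and zipping them.
import Mathlib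
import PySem

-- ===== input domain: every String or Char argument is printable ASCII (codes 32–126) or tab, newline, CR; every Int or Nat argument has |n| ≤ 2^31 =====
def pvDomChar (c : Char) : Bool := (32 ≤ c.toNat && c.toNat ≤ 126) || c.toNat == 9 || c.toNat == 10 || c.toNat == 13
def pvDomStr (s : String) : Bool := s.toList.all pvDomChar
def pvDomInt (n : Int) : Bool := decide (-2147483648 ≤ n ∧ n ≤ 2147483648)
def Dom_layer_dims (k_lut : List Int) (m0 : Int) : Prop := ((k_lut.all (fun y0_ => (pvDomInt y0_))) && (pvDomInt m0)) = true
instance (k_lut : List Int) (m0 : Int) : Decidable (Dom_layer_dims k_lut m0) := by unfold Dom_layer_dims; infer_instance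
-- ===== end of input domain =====

-- B builds three shifted parallel lists and zips them instead of A's per-index loop; objective: simpler.

-- ===== PORT A =====
-- all indices used by A are in range, so pyGetD with default 0 is exact here
def layer_dims (k_lut : List Int) (m0 : Int) : List (Int × Int × Int) :=
  let nl : Int := k_lut.length
  (PySem.List.pyRange 0 nl 1).foldl (fun out ul =>
    let k := PySem.List.pyGetD k_lut ul 0
    let n := if nl = 1 then PySem.List.pyGetD k_lut 0 0
             else if ul = nl - 1 then PySem.List.pyGetD k_lut (nl - 2) 0
             else PySem.List.pyGetD k_lut (ul + 1) 0
    let m := if ul = 0 then m0 else PySem.List.pyGetD k_lut (ul - 1) 0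
    out ++ [(k, n, m)]) []

-- ===== PORT B =====
-- Python's zip of three iterables, truncating, is k_list.zip (n_list.zip m_list)
def layer_dims_alt (k_lut : List Int) (m0 : Int) : List (Int × Int × Int) :=
  let nl : Int := k_lut.length
  if nl = 0 then []
  else
    let k_list := k_lut
    let m_list := m0 :: PySem.List.slice k_lut none (some (-1))
    let n_list := if nl = 1 then [PySem.List.pyGetD k_lut 0 0]
                  else PySem.List.slice k_lut (some 1) none ++ [PySem.List.pyGetD k_lut (nl - 2) 0]
    k_list.zip (n_list.zip m_list)

-- ===== PRECONDITION & SPEC =====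
def Spec_layer_dims (k_lut : List Int) (m0 : Int) (out : List (Int × Int × Int)) : Prop := out = layer_dims_alt k_lut m0
instance (k_lut : List Int) (m0 : Int) (out : List (Int × Int × Int)) : Decidable (Spec_layer_dims k_lut m0 out) := by unfold Spec_layer_dims; infer_instance

-- ===== CLAIM (what is proved, stated in full; the proofs are below) =====
def Claim_equal_layer_dims : Prop := ∀ (k_lut : List Int) (m0 : Int), Dom_layer_dims k_lut m0 → Spec_layer_dims k_lut m0 (layer_dims k_lut m0)

-- ===== LEMMAS AND PROOFS =====

theorem layer_dims_eq_map (k_lut : List Int) (m0 : Int) :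
    layer_dims k_lut m0 =
      (List.range k_lut.length).map (fun i =>
        (k_lut.getD i 0,
         (if k_lut.length = 1 then k_lut.getD 0 0
          else if i = k_lut.length - 1 then k_lut.getD (k_lut.length - 2) 0
          else k_lut.getD (i + 1) 0),
         (if i = 0 then m0 else k_lut.getD (i - 1) 0))) := by
  unfold layer_dims
  rw [PySem.List.foldl_append_singleton_eq_map, PySem.List.pyRange_one, List.map_map]
  simp only [sub_zero, Int.toNat_natCast, List.nil_append]
  apply List.map_congr_left
  intro k hk
  rw [List.mem_range] at hk
  have hc : ∀ (j : Nat), PySem.List.pyGetD k_lut (j : Int) 0 = k_lut.getD j 0 := fun j => by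
    simp [PySem.List.pyGetD_natCast]
  simp only [Function.comp_apply, zero_add, Prod.mk.injEq]
  refine ⟨hc k, ?_, ?_⟩
  · by_cases h1 : k_lut.length = 1
    · have h1' : (k_lut.length : Int) = 1 := by omega
      rw [if_pos h1', if_pos h1]
      exact hc 0
    · have h1' : (k_lut.length : Int) ≠ 1 := by omega
      rw [if_neg h1', if_neg h1]
      by_cases h2 : k = k_lut.length - 1
      · have h2' : (k : Int) = (k_lut.length : Int) - 1 := by omega
        rw [if_pos h2', if_pos h2]
        have he : ((k_lut.length : Int) - 2) = ((k_lut.length - 2 : Nat) : Int) := by omega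
        rw [he, hc]
      · have h2' : (k : Int) ≠ (k_lut.length : Int) - 1 := by omega
        rw [if_neg h2', if_neg h2]
        have he : ((k : Int) + 1) = ((k + 1 : Nat) : Int) := by omega
        rw [he, hc]
  · by_cases h0 : k = 0
    · have h0' : (k : Int) = 0 := by omega
      rw [if_pos h0', if_pos h0]
    · have h0' : (k : Int) ≠ 0 := by omega
      rw [if_neg h0', if_neg h0]
      have he : ((k : Int) - 1) = ((k - 1 : Nat) : Int) := by omega
      rw [he, hc]

theorem layer_dims_alt_eq_map (k_lut : List Int) (m0 : Int) :
    layer_dims_alt k_lut m0 =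
      (List.range k_lut.length).map (fun i =>
        (k_lut.getD i 0,
         (if k_lut.length = 1 then k_lut.getD 0 0
          else if i = k_lut.length - 1 then k_lut.getD (k_lut.length - 2) 0
          else k_lut.getD (i + 1) 0),
         (if i = 0 then m0 else k_lut.getD (i - 1) 0))) := by
  unfold layer_dims_alt
  by_cases h0 : k_lut.length = 0
  · simp [h0]
  · have h0' : (k_lut.length : Int) ≠ 0 := by omega
    rw [if_neg h0']
    rw [PySem.List.slice_to_neg_one, PySem.List.slice_from_one]
    by_cases h1 : k_lut.length = 1
    · have h1' : (k_lut.length : Int) = 1 := by omega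
      rw [if_pos h1']
      match k_lut, h1 with
      | [a], _ => simp [PySem.List.pyGetD_zero]
    · have h1' : (k_lut.length : Int) ≠ 1 := by omega
      rw [if_neg h1']
      have h2 : 2 ≤ k_lut.length := by omega
      have he : ((k_lut.length : Int) - 2) = ((k_lut.length - 2 : Nat) : Int) := by omega
      rw [he, PySem.List.pyGetD_natCast]
      apply List.ext_getElem
      · simp; omega
      · intro i hi1 hi2
        simp only [List.length_map, List.length_range] at hi2
        simp only [List.getElem_zip, List.getElem_map, List.getElem_range, Prod.mk.injEq]
        refine ⟨(List.getD_eq_getElem _ _ hi2).symm, ?_, ?_⟩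
        · rw [if_neg h1]
          by_cases hl : i = k_lut.length - 1
          · rw [if_pos hl]
            rw [List.getElem_append_right (by simp [List.length_tail]; omega)]
            simp [List.length_tail, hl]
          · rw [if_neg hl]
            rw [List.getElem_append_left (by simp [List.length_tail]; omega)]
            rw [List.getElem_tail, List.getD_eq_getElem _ _ (by omega)]
        · match i with
          | 0 => rw [List.getElem_cons_zero, if_pos rfl]
          | j + 1 =>
            rw [List.getElem_cons_succ, if_neg (by omega)]
            have hj : j < k_lut.length := by omega
            have hg : k_lut.getD (j + 1 - 1) 0 = k_lut[j] := by
              simp only [Nat.add_sub_cancel]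
              exact List.getD_eq_getElem _ _ hj
            rw [hg, List.getElem_dropLast]

-- ===== VERDICT (by name: the statement is the Claim_ definition above) =====
theorem layer_dims_spec : Claim_equal_layer_dims := by
  intro k_lut m0 _
  unfold Spec_layer_dims
  rw [layer_dims_eq_map, layer_dims_alt_eq_map]
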